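-- pv_equiv track=rewrite | github.com/spossner/adventofcode-2015 | 08-2.py | solve
-- ===== SOURCE A (Python) =====
-- def solve(data):
--     if type(data) is not list:
--         data = [data]
--
--     total_mem = 0
--     total_chars = 0
--
--     for text in data:
--         mem_count = 2  # starts and ends with "
--         char_count = 0
--
--         for c in text:
--             char_count += 1
--             mem_count += 1
--             if c in ('\\', '"'):
--                 mem_count += 1
--
--         total_mem += mem_count
--         total_chars += char_count
--
--     return (total_mem, total_chars)
-- ===== SOURCE B (Python) =====
-- def solve(data):
--     if type(data) is not list:
--         data = [data]
--
--     joined = ''.join(data)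
--     total_chars = len(joined)
--     total_mem = 2 * len(data) + total_chars + joined.count('\\') + joined.count('"')
--
--     return (total_mem, total_chars)
-- ===== Notes on version B (the rewrite author's own statement) =====
-- stated objective: faster
-- what changed: Instead of A's nested per-string/per-char Python loops with running accumulators, B joins all strings into one text and computes the answer globally (2*len(data) + len(joined) + joined.count('\\') + joined.count('"')), replacing the interpreted char loop by C-level str operations.
import Mathlib
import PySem

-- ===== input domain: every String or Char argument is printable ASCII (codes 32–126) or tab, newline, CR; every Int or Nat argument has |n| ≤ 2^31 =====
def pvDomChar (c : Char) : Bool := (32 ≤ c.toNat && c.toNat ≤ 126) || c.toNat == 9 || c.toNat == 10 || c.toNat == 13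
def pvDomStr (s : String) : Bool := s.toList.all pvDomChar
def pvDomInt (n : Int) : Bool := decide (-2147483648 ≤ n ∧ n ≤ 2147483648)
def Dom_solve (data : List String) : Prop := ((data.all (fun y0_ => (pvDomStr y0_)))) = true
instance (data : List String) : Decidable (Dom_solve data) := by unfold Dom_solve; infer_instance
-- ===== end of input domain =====

-- B replaces A's nested per-string/per-char loops by one global pass: join all strings once, then count on the joined text (2*len(data) + global len + global escape counts); measurably faster via C-level str operations.


-- ===== PORT A =====
-- the 'if type(data) is not list' guard is vacuous here: data is always a list
def solve (data : List String) : Int × Int :=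
  let totals : Int × Int :=
    data.foldl (fun tot text =>
      let inner : Int × Int :=
        text.toList.foldl (fun mc c =>
          let char_count := mc.2 + 1
          let mem_count := mc.1 + 1
          if c = '\\' ∨ c = '"' then (mem_count + 1, char_count)
          else (mem_count, char_count)) (2, 0)
      (tot.1 + inner.1, tot.2 + inner.2)) (0, 0)
  totals

-- ===== PORT B =====
def solve_alt (data : List String) : Int × Int :=
  let joined : String := PySem.Str.join "" data
  let total_chars : Int := PySem.Str.len joined
  let total_mem : Int := 2 * data.length + total_chars
      + (PySem.Str.count joined "\\" : Int) + (PySem.Str.count joined "\"" : Int)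
  (total_mem, total_chars)

-- ===== PRECONDITION & SPEC =====
def Spec_solve (data : List String) (out : Int × Int) : Prop := out = solve_alt data
instance (data : List String) (out : Int × Int) : Decidable (Spec_solve data out) := by unfold Spec_solve; infer_instance

-- ===== CLAIM (what is proved, stated in full; the proofs are below) =====
def Claim_equal_solve : Prop := ∀ (data : List String), Dom_solve data → Spec_solve data (solve data)

-- ===== LEMMAS AND PROOFS =====

theorem count_go_singleton (c : Char) (l : List Char) (acc fuel : Nat)
    (h : l.length ≤ fuel) :
    PySem.Chars.count.go [c] fuel l acc = acc + l.count c := by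
  induction l generalizing acc fuel with
  | nil => cases fuel <;> simp [PySem.Chars.count.go]
  | cons x t ih =>
    cases fuel with
    | zero => simp at h
    | succ n =>
      simp only [List.length_cons, Nat.succ_le_succ_iff] at h
      by_cases hx : x = c
      · subst hx
        simp [PySem.Chars.count.go, List.isPrefixOf, ih _ _ h]
        omega
      · have : List.isPrefixOf [c] (x :: t) = false := by
          simp [List.isPrefixOf]; exact fun h' => (hx h'.symm).elim
        simp [PySem.Chars.count.go, this, ih _ _ h, hx]

theorem count_singleton (c : Char) (l : List Char) :
    PySem.Chars.count l [c] = l.count c := by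
  simp [PySem.Chars.count, count_go_singleton c l 0 l.length le_rfl]

theorem join_empty_eq_flatten (l : List (List Char)) :
    PySem.Chars.join [] l = l.flatten := by
  simp only [PySem.Chars.join, List.intercalate]
  induction l with
  | nil => simp
  | cons x t ih => cases t <;> simp_all [List.intersperse]

theorem inner_fold (l : List Char) (m k : Int) :
    l.foldl (fun mc c =>
      let char_count := mc.2 + 1
      let mem_count := mc.1 + 1
      if c = '\\' ∨ c = '"' then (mem_count + 1, char_count)
      else (mem_count, char_count)) (m, k)
    = (m + l.length + l.count '\\' + l.count '"', k + l.length) := by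
  induction l generalizing m k with
  | nil => simp
  | cons x t ih =>
    by_cases hx : x = '\\' ∨ x = '"'
    · rcases hx with hx | hx <;> subst hx <;>
        simp [List.foldl_cons, ih] <;> constructor <;> ring
    · simp only [not_or] at hx
      simp [List.foldl_cons, hx.1, hx.2, ih]
      constructor <;> ring

theorem solveA_char (data : List String) :
    solve data =
      ((data.map (fun s => 2 + (s.toList.length : Int) + s.toList.count '\\'
          + s.toList.count '"')).sum,
       (data.map (fun s => (s.toList.length : Int))).sum) := by
  unfold solve
  induction data using List.reverseRecOn with
  | nil => simp
  | append_singleton t s ih =>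
    simp only [List.foldl_append, List.foldl_cons, List.foldl_nil, inner_fold,
      List.map_append, List.map_cons, List.map_nil, List.sum_append, List.sum_cons,
      List.sum_nil] at ih ⊢
    rw [Prod.ext_iff] at ih ⊢
    obtain ⟨ih1, ih2⟩ := ih
    constructor <;> (simp only [ih1, ih2]; ring)

theorem solveB_char (data : List String) :
    solve_alt data =
      (2 * data.length + ((data.map String.toList).flatten.length : Int)
        + (data.map String.toList).flatten.count '\\'
        + (data.map String.toList).flatten.count '"',
       ((data.map String.toList).flatten.length : Int)) := by
  have hjoin : (PySem.Str.join "" data).toList = (data.map String.toList).flatten := by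
    simp [join_empty_eq_flatten]
  have hbs : "\\".toList = ['\\'] := rfl
  have hq : "\"".toList = ['"'] := rfl
  unfold solve_alt
  simp only [PySem.Str.count, PySem.Str.len, hjoin, hbs, hq, count_singleton]

theorem solve_eq_alt (data : List String) : solve data = solve_alt data := by
  rw [solveA_char, solveB_char]
  induction data with
  | nil => simp
  | cons s t ih =>
    simp only [List.map_cons, List.flatten_cons, List.sum_cons, List.length_cons,
      List.length_append, List.count_append] at *
    obtain ⟨ih1, ih2⟩ := Prod.mk.injEq _ _ _ _ ▸ ih
    refine Prod.ext ?_ ?_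
    · simp_all
      ring
    · simp_all

-- ===== VERDICT (by name: the statement is the Claim_ definition above) =====
theorem solve_spec : Claim_equal_solve := by
  intro data _
  unfold Spec_solve
  exact solve_eq_alt data
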